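-- pv_equiv track=rewrite | github.com/greenca/checkio | cipher-map2.py | recall_password
-- ===== SOURCE A (Python) =====
-- def recall_password(cipher_grille, ciphered_password):
--     windows = []
--     for i, row in enumerate(cipher_grille):
--         for j, char in enumerate(row):
--             if char=='X':
--                 windows.append((i, j))
--     password = ""
--     for n in range(4):
--         for (i, j) in windows:
--             password += ciphered_password[i][j]
--         windows = rotate_windows(windows)
--     return password
--
-- def rotate_windows(windows):
--     rotated = []
--     for (i, j) in windows:
--         rotated.append((j, 3-i))
--     rotated.sort()
--     return rotated
-- ===== SOURCE B (Python) =====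
-- def recall_password(cipher_grille, ciphered_password):
--     holes = {(i, j) for i, row in enumerate(cipher_grille)
--              for j, ch in enumerate(row) if ch == 'X'}
--     chars = []
--     for _ in range(4):
--         if holes:
--             rows = [i for i, _ in holes]
--             cols = [j for _, j in holes]
--             for a in range(min(rows), max(rows) + 1):
--                 for b in range(min(cols), max(cols) + 1):
--                     if (a, b) in holes:
--                         chars.append(ciphered_password[a][b])
--         holes = {(j, 3 - i) for i, j in holes}
--     return ''.join(chars)
-- ===== Notes on version B (the rewrite author's own statement) =====
-- stated objective: alternative
-- what changed: B eliminates sorting entirely: it keeps the holes as a set, and each of the four rounds reads the ciphertext by a row-major bounding-box scan (for a in min..max of row indices, for b in min..max of column indices, emit the cell if (a,b) is a hole), which visits the holes in exactly the sorted order A obtains by rotate-then-sort of a coordinate list; the set is then rotated pointwise.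
import Mathlib
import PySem

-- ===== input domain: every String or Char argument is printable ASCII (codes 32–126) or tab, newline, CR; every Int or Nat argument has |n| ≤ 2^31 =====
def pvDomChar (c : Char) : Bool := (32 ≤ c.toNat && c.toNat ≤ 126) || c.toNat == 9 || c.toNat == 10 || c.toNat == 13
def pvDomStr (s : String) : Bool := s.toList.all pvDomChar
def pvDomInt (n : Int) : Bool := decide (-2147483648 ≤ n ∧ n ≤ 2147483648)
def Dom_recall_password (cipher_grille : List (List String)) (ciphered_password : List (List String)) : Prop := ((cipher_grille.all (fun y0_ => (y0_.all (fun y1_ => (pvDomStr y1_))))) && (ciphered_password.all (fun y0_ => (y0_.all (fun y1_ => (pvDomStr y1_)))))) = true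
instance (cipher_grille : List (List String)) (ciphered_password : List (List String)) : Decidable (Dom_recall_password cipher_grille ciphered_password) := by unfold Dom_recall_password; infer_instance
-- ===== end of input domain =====

-- B keeps the holes as a set and reads each round by a row-major bounding-box scan with a membership test (no sorting anywhere), instead of A's rotate-then-sort of a coordinate list (alternative decomposition, similar cost).


-- ===== PORT A =====
def rotate_windows (windows : List (Int × Int)) : List (Int × Int) :=
  PySem.List.sorted2
    (windows.foldl (fun rotated w => rotated ++ [(w.2, 3 - w.1)]) [])
    Prod.fst Prod.snd

def recall_password (cipher_grille : List (List String)) (ciphered_password : List (List String)) : String :=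
  let windows : List (Int × Int) :=
    (PySem.List.enumerate cipher_grille).foldl (fun ws iv =>
      (PySem.List.enumerate iv.2).foldl (fun ws2 jc =>
        if jc.2 == "X" then ws2 ++ [(iv.1, jc.1)] else ws2) ws) []
  ((PySem.List.pyRange 0 4 1).foldl (fun (st : String × List (Int × Int)) _n =>
      (st.2.foldl (fun pw w =>
          pw ++ PySem.List.pyGetD (PySem.List.pyGetD ciphered_password w.1 []) w.2 "") st.1,
       rotate_windows st.2)) ("", windows)).1

-- ===== PORT B =====
-- the body of B's round loop: scan the bounding box of the hole set row-major,
-- appending the ciphertext cell for every position that is a hole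
def alt_round (ciphered_password : List (List String)) (chars : List String)
    (holes : PySem.Set (Int × Int)) : List String :=
  if holes.isEmpty then chars
  else
    let rows := holes.map Prod.fst
    let cols := holes.map Prod.snd
    (PySem.List.pyRange ((PySem.List.min? rows (fun x => x)).getD 0)
        ((PySem.List.max? rows (fun x => x)).getD 0 + 1) 1).foldl (fun acc a =>
      (PySem.List.pyRange ((PySem.List.min? cols (fun x => x)).getD 0)
          ((PySem.List.max? cols (fun x => x)).getD 0 + 1) 1).foldl (fun acc2 b =>
        if PySem.Set.contains holes (a, b) then
          acc2 ++ [PySem.List.pyGetD (PySem.List.pyGetD ciphered_password a []) b ""]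
        else acc2) acc) chars

-- '{(j, 3 - i) for i, j in holes}'
def alt_rotate (holes : PySem.Set (Int × Int)) : PySem.Set (Int × Int) :=
  PySem.Set.ofList (holes.map (fun p => (p.2, 3 - p.1)))

def recall_password_alt (cipher_grille : List (List String)) (ciphered_password : List (List String)) : String :=
  let holes0 : PySem.Set (Int × Int) :=
    PySem.Set.ofList ((PySem.List.enumerate cipher_grille).flatMap (fun iv =>
      ((PySem.List.enumerate iv.2).filter (fun jc => jc.2 == "X")).map
        (fun jc => (iv.1, jc.1))))
  let final := (PySem.List.pyRange 0 4 1).foldl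
    (fun (st : List String × PySem.Set (Int × Int)) _n =>
      (alt_round ciphered_password st.1 st.2, alt_rotate st.2)) ([], holes0)
  PySem.Str.join "" final.1

-- ===== PRECONDITION & SPEC =====
-- a ciphered_password lookup at position p succeeds (Python indexing, negative wrap included)
def pvOk (cp : List (List String)) (p : Int × Int) : Bool :=
  match PySem.List.pyGet? cp p.1 with
  | some row => (PySem.List.pyGet? row p.2).isSome
  | none => false

-- Pre_ = exactly the inputs on which A returns: every window cell 'X' of the grille must admit
-- the ciphered_password lookup at its position and at its three quarter-turn images
-- (otherwise A raises IndexError on some round).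
def Pre_recall_password (cipher_grille : List (List String)) (ciphered_password : List (List String)) : Prop :=
  ∀ iv ∈ PySem.List.enumerate cipher_grille, ∀ jc ∈ PySem.List.enumerate iv.2,
    jc.2 = "X" →
      (pvOk ciphered_password (iv.1, jc.1) = true ∧
       pvOk ciphered_password (jc.1, 3 - iv.1) = true ∧
       pvOk ciphered_password (3 - iv.1, 3 - jc.1) = true ∧
       pvOk ciphered_password (3 - jc.1, iv.1) = true)
instance (cipher_grille : List (List String)) (ciphered_password : List (List String)) : Decidable (Pre_recall_password cipher_grille ciphered_password) := by unfold Pre_recall_password; infer_instance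

def pvWitness_recall_password : List (List String) × List (List String) :=
  ([["X", ".", ".", "."], [".", ".", "X", "."], [".", ".", ".", "."], [".", "X", ".", "."]],
   [["a", "b", "c", "d"], ["e", "f", "g", "h"], ["i", "j", "k", "l"], ["m", "n", "o", "p"]])

def Spec_recall_password (cipher_grille : List (List String)) (ciphered_password : List (List String)) (out : String) : Prop := out = recall_password_alt cipher_grille ciphered_password
instance (cipher_grille : List (List String)) (ciphered_password : List (List String)) (out : String) : Decidable (Spec_recall_password cipher_grille ciphered_password out) := by unfold Spec_recall_password; infer_instance

-- ===== CLAIM (what is proved, stated in full; the proofs are below) =====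
def Claim_equal_recall_password : Prop := ∀ (cipher_grille : List (List String)) (ciphered_password : List (List String)), Dom_recall_password cipher_grille ciphered_password → Pre_recall_password cipher_grille ciphered_password → Spec_recall_password cipher_grille ciphered_password (recall_password cipher_grille ciphered_password)

-- ===== LEMMAS AND PROOFS =====

-- the boolean comparator sorted2 uses on (fst, snd) keys
def pvLt (a b : Int × Int) : Bool :=
  decide (a.1 < b.1) || (!decide (b.1 < a.1) && decide (a.2 < b.2))

theorem pvLt_asymm (a b : Int × Int) (h : pvLt a b = true) : pvLt b a = false := by
  simp [pvLt] at *; omega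

theorem pvLt_trans (a b c : Int × Int) (h1 : pvLt a b = true) (h2 : pvLt b c = true) :
    pvLt a c = true := by
  simp [pvLt] at *; omega

theorem pvLt_total (a b : Int × Int) (h1 : pvLt a b = false) (h2 : pvLt b a = false) : a = b := by
  simp [pvLt] at *
  exact Prod.ext (by omega) (by omega)

theorem pv_pairwise_insertBy (x : Int × Int) (ys : List (Int × Int))
    (h : ys.Pairwise (fun a b => pvLt b a = false)) :
    (PySem.List.insertBy pvLt x ys).Pairwise (fun a b => pvLt b a = false) := by
  induction ys with
  | nil => simp [PySem.List.insertBy]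
  | cons y t ih =>
    rw [List.pairwise_cons] at h
    by_cases hxy : pvLt x y = true
    · have hins : PySem.List.insertBy pvLt x (y :: t) = x :: y :: t := by
        simp [PySem.List.insertBy, hxy]
      rw [hins]
      refine List.Pairwise.cons ?_ (List.Pairwise.cons h.1 h.2)
      intro z hz
      rcases List.mem_cons.1 hz with rfl | hzt
      · exact pvLt_asymm _ _ hxy
      · cases hzx : pvLt z x with
        | false => rfl
        | true =>
          have h1 := pvLt_trans z x y hzx hxy
          have h2 := h.1 z hzt
          rw [h1] at h2
          exact h2
    · have hxy' : pvLt x y = false := by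
        cases hv : pvLt x y with
        | false => rfl
        | true => exact absurd hv hxy
      have hins : PySem.List.insertBy pvLt x (y :: t) = y :: PySem.List.insertBy pvLt x t := by
        simp [PySem.List.insertBy, hxy']
      rw [hins]
      refine List.Pairwise.cons ?_ (ih h.2)
      intro z hz
      rcases (PySem.List.mem_insertBy pvLt x z t).1 hz with rfl | hzt
      · exact hxy'
      · exact h.1 z hzt

theorem pv_sorted2_pairwise (xs : List (Int × Int)) :
    (PySem.List.sorted2 xs Prod.fst Prod.snd).Pairwise (fun a b => pvLt b a = false) := by
  show (List.foldl (fun acc x => PySem.List.insertBy pvLt x acc) [] xs).Pairwise _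
  suffices h : ∀ (acc : List (Int × Int)), acc.Pairwise (fun a b => pvLt b a = false) →
      (List.foldl (fun acc x => PySem.List.insertBy pvLt x acc) acc xs).Pairwise
        (fun a b => pvLt b a = false) from h [] (by simp)
  induction xs with
  | nil => intro acc hacc; simpa using hacc
  | cons x t ih =>
    intro acc hacc
    exact ih _ (pv_pairwise_insertBy x acc hacc)

-- any strictly lex-increasing rearrangement names the sorted2 result
theorem pv_sorted2_eq (xs ys : List (Int × Int)) (hperm : ys.Perm xs)
    (hp : ys.Pairwise (fun a b => pvLt a b = true)) :
    PySem.List.sorted2 xs Prod.fst Prod.snd = ys := by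
  have hL : (PySem.List.sorted2 xs Prod.fst Prod.snd).Perm ys :=
    (PySem.List.sorted2_perm xs Prod.fst Prod.snd false).trans hperm.symm
  refine List.Perm.eq_of_pairwise ?_ (pv_sorted2_pairwise xs) ?_ hL
  · intro a b _ _ h1 h2; exact pvLt_total a b h2 h1
  · exact hp.imp (fun h => pvLt_asymm _ _ h)

theorem pv_pairwise_lt_nodup (xs : List (Int × Int))
    (h : xs.Pairwise (fun a b => pvLt a b = true)) : xs.Nodup := by
  have hne : xs.Pairwise (fun a b => a ≠ b) := by
    refine h.imp ?_
    intro a b hlt heq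
    subst heq
    simp [pvLt] at hlt
  exact hne

theorem pvLt_of_wle_ne (a b : Int × Int) (h1 : pvLt b a = false) (h2 : a ≠ b) :
    pvLt a b = true := by
  cases hv : pvLt a b with
  | true => rfl
  | false => exact absurd (pvLt_total a b hv h1) h2

-- sorting is invariant under rearranging a duplicate-free input
theorem pv_sorted2_of_perm (xs ys : List (Int × Int)) (hperm : xs.Perm ys) (hnd : ys.Nodup) :
    PySem.List.sorted2 xs Prod.fst Prod.snd = PySem.List.sorted2 ys Prod.fst Prod.snd := by
  apply pv_sorted2_eq
  · exact (PySem.List.sorted2_perm ys Prod.fst Prod.snd false).trans hperm.symm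
  · have hwle := pv_sorted2_pairwise ys
    have hndz : (PySem.List.sorted2 ys Prod.fst Prod.snd).Nodup :=
      ((PySem.List.sorted2_perm ys Prod.fst Prod.snd false).nodup_iff).2 hnd
    have hne : (PySem.List.sorted2 ys Prod.fst Prod.snd).Pairwise (fun a b => a ≠ b) := hndz
    exact (hwle.and hne).imp (fun h => pvLt_of_wle_ne _ _ h.1 h.2)

theorem pv_inj_rot : Function.Injective (fun p : Int × Int => (p.2, 3 - p.1)) := by
  intro a b h
  simp [Prod.ext_iff] at h ⊢
  omega

theorem pv_inj_rot2 : Function.Injective (fun p : Int × Int => (3 - p.1, 3 - p.2)) := by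
  intro a b h
  simp [Prod.ext_iff] at h ⊢
  omega

-- composing the quarter turns
theorem pv_comp2 : (fun p : Int × Int => (p.2, 3 - p.1)) ∘ (fun p : Int × Int => (p.2, 3 - p.1))
    = (fun p : Int × Int => (3 - p.1, 3 - p.2)) := rfl

theorem pv_comp3 : (fun p : Int × Int => (p.2, 3 - p.1)) ∘ (fun p : Int × Int => (3 - p.1, 3 - p.2))
    = (fun p : Int × Int => (3 - p.2, p.1)) := by
  funext w
  simp [Function.comp]

-- A's window-collecting fold is the flat comprehension
theorem pv_windows_norm (cg : List (List String)) :
    ((PySem.List.enumerate cg).foldl (fun ws iv =>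
      (PySem.List.enumerate iv.2).foldl (fun ws2 jc =>
        if jc.2 == "X" then ws2 ++ [(iv.1, jc.1)] else ws2) ws) [])
    = (PySem.List.enumerate cg).flatMap (fun iv =>
        ((PySem.List.enumerate iv.2).filter (fun jc => jc.2 == "X")).map
          (fun jc => (iv.1, jc.1))) := by
  simp only [PySem.List.foldl_append_if, PySem.List.foldl_append_eq_flatMap, List.nil_append]

-- every collected position in rows enumerated from t has first component ≥ t
theorem pv_ws_fst_ge (rows : List (List String)) (t : Int) :
    ∀ y ∈ (PySem.List.enumerate rows t).flatMap (fun iv =>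
        ((PySem.List.enumerate iv.2).filter (fun jc => jc.2 == "X")).map
          (fun jc => (iv.1, jc.1))), t ≤ y.1 := by
  intro y hy
  rw [List.mem_flatMap] at hy
  obtain ⟨iv, hiv, hy⟩ := hy
  rw [PySem.List.mem_enumerate_iff] at hiv
  obtain ⟨k, hk, rfl⟩ := hiv
  rw [List.mem_map] at hy
  obtain ⟨jc, _, rfl⟩ := hy
  simp

-- one row contributes a strictly increasing chunk
theorem pv_chunk_pairwise (i : Int) (r : List String) :
    (((PySem.List.enumerate r).filter (fun jc => jc.2 == "X")).map
      (fun jc : Int × String => (i, jc.1))).Pairwise (fun a b => pvLt a b = true) := by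
  have h1 : (PySem.List.enumerate r).Pairwise (fun p q => p.1 < q.1) :=
    PySem.List.pairwise_lt_enumerate r 0
  have h2 : ((PySem.List.enumerate r).filter (fun jc => jc.2 == "X")).Pairwise
      (fun p q => p.1 < q.1) := h1.sublist List.filter_sublist
  rw [List.pairwise_map]
  refine h2.imp ?_
  intro a b hab
  simp [pvLt]
  omega

-- the collected window list is strictly increasing row-major
theorem pv_ws_pairwise (rows : List (List String)) (t : Int) :
    ((PySem.List.enumerate rows t).flatMap (fun iv =>
        ((PySem.List.enumerate iv.2).filter (fun jc => jc.2 == "X")).map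
          (fun jc => (iv.1, jc.1)))).Pairwise (fun a b => pvLt a b = true) := by
  induction rows generalizing t with
  | nil => simp [PySem.List.enumerate_nil]
  | cons r rows ih =>
    rw [PySem.List.enumerate_cons, List.flatMap_cons, List.pairwise_append]
    refine ⟨pv_chunk_pairwise t r, ih (t + 1), ?_⟩
    intro a ha b hb
    have hb1 : t + 1 ≤ b.1 := pv_ws_fst_ge rows (t + 1) b hb
    have ha1 : a.1 = t := by
      rw [List.mem_map] at ha
      obtain ⟨jc, _, rfl⟩ := ha
      rfl
    simp [pvLt]
    omega

-- strings: the += loop is a join over the mapped cells, and join splits over ++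
theorem pv_inter_cons (x : List Char) (xs : List (List Char)) :
    ([] : List Char).intercalate (x :: xs) = x ++ ([] : List Char).intercalate xs := by
  cases xs with
  | nil => rfl
  | cons y ys => simp [List.intercalate, List.intersperse]

theorem pv_join_nil : PySem.Str.join "" [] = "" := by
  simp [PySem.Str.join, PySem.Chars.join, show ([] : List Char).intercalate [] = [] from rfl]

theorem pv_join_cons (p : String) (ps : List String) :
    PySem.Str.join "" (p :: ps) = p ++ PySem.Str.join "" ps := by
  have h0 : ("" : String).toList = ([] : List Char) := by simp
  simp only [PySem.Str.join, PySem.Chars.join, h0, List.map_cons, pv_inter_cons]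
  simp

theorem pv_join_append (xs ys : List String) :
    PySem.Str.join "" (xs ++ ys) = PySem.Str.join "" xs ++ PySem.Str.join "" ys := by
  induction xs with
  | nil => rw [List.nil_append, pv_join_nil, String.empty_append]
  | cons x t ih => rw [List.cons_append, pv_join_cons, pv_join_cons, ih, String.append_assoc]

theorem pv_strfold (cp : List (List String)) (ws : List (Int × Int)) (s : String) :
    ws.foldl (fun pw w =>
        pw ++ PySem.List.pyGetD (PySem.List.pyGetD cp w.1 []) w.2 "") s
    = s ++ PySem.Str.join "" (ws.map (fun p =>
        PySem.List.pyGetD (PySem.List.pyGetD cp p.1 []) p.2 "")) := by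
  induction ws generalizing s with
  | nil => rw [List.foldl_nil, List.map_nil, pv_join_nil, String.append_empty]
  | cons w t ih =>
    rw [List.foldl_cons, ih, List.map_cons, pv_join_cons, ← String.append_assoc]

-- set(xs) of a duplicate-free list is the list itself
theorem pv_foldl_add (xs : List (Int × Int)) (s : List (Int × Int)) (h : (s ++ xs).Nodup) :
    xs.foldl PySem.Set.add s = s ++ xs := by
  induction xs generalizing s with
  | nil => simp
  | cons x t ih =>
    have hdisj := (List.nodup_append.mp h).2.2
    have hx : x ∉ s := fun hmem => hdisj x hmem x (by simp) rfl
    have hc : PySem.Set.add s x = s ++ [x] := by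
      simp [PySem.Set.add, PySem.Set.contains, hx]
    have hn : ((s ++ [x]) ++ t).Nodup := by
      rw [List.append_assoc, List.singleton_append]; exact h
    rw [List.foldl_cons, hc, ih (s ++ [x]) hn, List.append_assoc, List.singleton_append]

theorem pv_ofList_nodup (xs : List (Int × Int)) (h : xs.Nodup) :
    PySem.Set.ofList xs = xs := by
  have := pv_foldl_add xs [] (by simpa using h)
  simpa [PySem.Set.ofList, PySem.Set.empty] using this

-- membership in the bounding-box scan list
theorem pv_scan_mem (as bs : List Int) (P : Int → Int → Bool) (p : Int × Int) :
    p ∈ as.flatMap (fun a => ((bs.filter (P a)).map (fun b => ((a : Int), b)))) ↔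
      p.1 ∈ as ∧ p.2 ∈ bs ∧ P p.1 p.2 = true := by
  constructor
  · intro hp
    rw [List.mem_flatMap] at hp
    obtain ⟨a, ha, hp⟩ := hp
    rw [List.mem_map] at hp
    obtain ⟨b, hb, rfl⟩ := hp
    rw [List.mem_filter] at hb
    exact ⟨ha, hb.1, hb.2⟩
  · rintro ⟨h1, h2, h3⟩
    rw [List.mem_flatMap]
    refine ⟨p.1, h1, ?_⟩
    rw [List.mem_map]
    exact ⟨p.2, List.mem_filter.mpr ⟨h2, h3⟩, rfl⟩

-- the scan list is strictly increasing in lexicographic order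
theorem pv_scan_pairwise (as bs : List Int) (P : Int → Int → Bool)
    (ha : as.Pairwise (· < ·)) (hb : bs.Pairwise (· < ·)) :
    (as.flatMap (fun a => ((bs.filter (P a)).map (fun b => ((a : Int), b))))).Pairwise
      (fun x y => pvLt x y = true) := by
  induction as with
  | nil => simp
  | cons a t ih =>
    rw [List.pairwise_cons] at ha
    rw [List.flatMap_cons, List.pairwise_append]
    refine ⟨?_, ih ha.2, ?_⟩
    · rw [List.pairwise_map]
      refine (hb.sublist List.filter_sublist).imp ?_
      intro x y hxy
      simp [pvLt]
      omega
    · intro x hx y hy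
      obtain ⟨bx, _, rfl⟩ := List.mem_map.1 hx
      rw [List.mem_flatMap] at hy
      obtain ⟨a', ha', hy⟩ := hy
      obtain ⟨by', _, rfl⟩ := List.mem_map.1 hy
      have : a < a' := ha.1 a' ha'
      simp [pvLt]
      omega

-- every member of a list lies in the pyRange from its min to its max (inclusive)
theorem pv_mem_rangeOf (xs : List Int) (x : Int) (hx : x ∈ xs) :
    x ∈ PySem.List.pyRange ((PySem.List.min? xs (fun y => y)).getD 0)
        ((PySem.List.max? xs (fun y => y)).getD 0 + 1) 1 := by
  cases hm : PySem.List.min? xs (fun y => y) with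
  | none =>
    rw [PySem.List.min?_eq_none_iff] at hm
    subst hm
    exact absurd hx (List.not_mem_nil)
  | some m =>
    cases hM : PySem.List.max? xs (fun y => y) with
    | none =>
      rw [PySem.List.max?_eq_none_iff] at hM
      subst hM
      exact absurd hx (List.not_mem_nil)
    | some M =>
      have h1 := PySem.List.min?_isMin hm x hx
      have h2 := PySem.List.max?_isMax hM x hx
      simp only at h1 h2
      simp only [Option.getD_some]
      rw [PySem.List.mem_pyRange_one]
      omega

theorem pv_contains_iff (s : List (Int × Int)) (p : Int × Int) :
    PySem.Set.contains s p = true ↔ p ∈ s := by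
  simp [PySem.Set.contains]

-- one round of B reads exactly the sorted hole list
theorem pv_round_eq (cp : List (List String)) (holes : List (Int × Int))
    (hnd : holes.Nodup) (acc : List String) :
    alt_round cp acc holes = acc ++ (PySem.List.sorted2 holes Prod.fst Prod.snd).map
      (fun p => PySem.List.pyGetD (PySem.List.pyGetD cp p.1 []) p.2 "") := by
  cases holes with
  | nil => simp [alt_round, show PySem.List.sorted2 ([] : List (Int × Int)) Prod.fst Prod.snd = [] from rfl]
  | cons h t =>
    have hne : ((h :: t : List (Int × Int)).isEmpty) = false := rfl
    unfold alt_round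
    rw [hne]
    simp only [Bool.false_eq_true, if_false]
    set holes := h :: t with hh
    set asL := PySem.List.pyRange ((PySem.List.min? (holes.map Prod.fst) (fun x => x)).getD 0)
        ((PySem.List.max? (holes.map Prod.fst) (fun x => x)).getD 0 + 1) 1 with hasL
    set bsL := PySem.List.pyRange ((PySem.List.min? (holes.map Prod.snd) (fun x => x)).getD 0)
        ((PySem.List.max? (holes.map Prod.snd) (fun x => x)).getD 0 + 1) 1 with hbsL
    simp only [PySem.List.foldl_append_if, PySem.List.foldl_append_eq_flatMap]
    have hS : asL.flatMap (fun a => ((bsL.filter (fun b => PySem.Set.contains holes (a, b))).map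
          (fun b => PySem.List.pyGetD (PySem.List.pyGetD cp a []) b "")))
        = (asL.flatMap (fun a => ((bsL.filter (fun b => PySem.Set.contains holes (a, b))).map
            (fun b => ((a : Int), b))))).map
          (fun p => PySem.List.pyGetD (PySem.List.pyGetD cp p.1 []) p.2 "") := by
      rw [List.map_flatMap]
      apply List.flatMap_congr
      intro a _
      rw [List.map_map]
      rfl
    rw [hS]
    have hpair : (asL.flatMap (fun a => ((bsL.filter (fun b => PySem.Set.contains holes (a, b))).map
        (fun b => ((a : Int), b))))).Pairwise (fun x y => pvLt x y = true) := by
      apply pv_scan_pairwise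
      · rw [hasL]; exact PySem.List.pairwise_lt_pyRange_one _ _
      · rw [hbsL]; exact PySem.List.pairwise_lt_pyRange_one _ _
    have hmem : ∀ p : Int × Int, p ∈ asL.flatMap (fun a =>
        ((bsL.filter (fun b => PySem.Set.contains holes (a, b))).map
          (fun b => ((a : Int), b)))) ↔ p ∈ holes := by
      intro p
      rw [pv_scan_mem]
      constructor
      · rintro ⟨_, _, h3⟩
        exact (pv_contains_iff holes (p.1, p.2)).mp h3
      · intro hp
        refine ⟨?_, ?_, (pv_contains_iff holes (p.1, p.2)).mpr (by simpa using hp)⟩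
        · rw [hasL]; exact pv_mem_rangeOf _ _ (List.mem_map_of_mem hp)
        · rw [hbsL]; exact pv_mem_rangeOf _ _ (List.mem_map_of_mem hp)
    have hperm : (asL.flatMap (fun a => ((bsL.filter (fun b => PySem.Set.contains holes (a, b))).map
        (fun b => ((a : Int), b))))).Perm holes :=
      (List.perm_ext_iff_of_nodup (pv_pairwise_lt_nodup _ hpair) hnd).mpr hmem
    rw [pv_sorted2_eq holes _ hperm hpair]

-- ===== VERDICT (by name: the statement is the Claim_ definition above) =====
theorem recall_password_spec : Claim_equal_recall_password := by
  intro cg cp _hdom _hpre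
  simp only [Spec_recall_password, recall_password, recall_password_alt]
  rw [pv_windows_norm cg]
  have hpw : ((PySem.List.enumerate cg).flatMap (fun iv =>
      ((PySem.List.enumerate iv.2).filter (fun jc => jc.2 == "X")).map
        (fun jc => (iv.1, jc.1)))).Pairwise (fun a b => pvLt a b = true) :=
    pv_ws_pairwise cg 0
  generalize hgen : ((PySem.List.enumerate cg).flatMap (fun iv =>
      ((PySem.List.enumerate iv.2).filter (fun jc => jc.2 == "X")).map
        (fun jc => (iv.1, jc.1)))) = ws at hpw ⊢
  have hnd0 : ws.Nodup := pv_pairwise_lt_nodup ws hpw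
  rw [show PySem.List.pyRange 0 4 1 = [0, 1, 2, 3] from rfl]
  simp only [List.foldl_cons, List.foldl_nil]
  -- A's window lists over the four rounds
  have hrw1 : rotate_windows ws
      = PySem.List.sorted2 (ws.map (fun p : Int × Int => (p.2, 3 - p.1))) Prod.fst Prod.snd := by
    unfold rotate_windows
    rw [PySem.List.foldl_append_singleton_eq_map (fun w : Int × Int => (w.2, 3 - w.1)) ws [],
        List.nil_append]
  have hnd1 : (ws.map (fun p : Int × Int => (p.2, 3 - p.1))).Nodup := hnd0.map pv_inj_rot
  have hnd2 : (ws.map (fun p : Int × Int => (3 - p.1, 3 - p.2))).Nodup := hnd0.map pv_inj_rot2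
  have hnd3 : (ws.map (fun p : Int × Int => (3 - p.2, p.1))).Nodup := by
    rw [← pv_comp3, ← List.map_map]
    exact hnd2.map pv_inj_rot
  have hrw2 : rotate_windows
        (PySem.List.sorted2 (ws.map (fun p : Int × Int => (p.2, 3 - p.1))) Prod.fst Prod.snd)
      = PySem.List.sorted2 (ws.map (fun p : Int × Int => (3 - p.1, 3 - p.2))) Prod.fst Prod.snd := by
    unfold rotate_windows
    rw [PySem.List.foldl_append_singleton_eq_map (fun w : Int × Int => (w.2, 3 - w.1)) _ [],
        List.nil_append]
    rw [pv_sorted2_of_perm _ ((ws.map (fun p : Int × Int => (p.2, 3 - p.1))).map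
          (fun p : Int × Int => (p.2, 3 - p.1)))
        (List.Perm.map _ (PySem.List.sorted2_perm _ Prod.fst Prod.snd false))
        (hnd1.map pv_inj_rot)]
    rw [List.map_map, pv_comp2]
  have hrw3 : rotate_windows
        (PySem.List.sorted2 (ws.map (fun p : Int × Int => (3 - p.1, 3 - p.2))) Prod.fst Prod.snd)
      = PySem.List.sorted2 (ws.map (fun p : Int × Int => (3 - p.2, p.1))) Prod.fst Prod.snd := by
    unfold rotate_windows
    rw [PySem.List.foldl_append_singleton_eq_map (fun w : Int × Int => (w.2, 3 - w.1)) _ [],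
        List.nil_append]
    rw [pv_sorted2_of_perm _ ((ws.map (fun p : Int × Int => (3 - p.1, 3 - p.2))).map
          (fun p : Int × Int => (p.2, 3 - p.1)))
        (List.Perm.map _ (PySem.List.sorted2_perm _ Prod.fst Prod.snd false))
        (hnd2.map pv_inj_rot)]
    rw [List.map_map, pv_comp3]
  -- B's hole sets over the four rounds
  have hs0 : PySem.Set.ofList ws = ws := pv_ofList_nodup ws hnd0
  have hb1 : alt_rotate ws = ws.map (fun p : Int × Int => (p.2, 3 - p.1)) := by
    unfold alt_rotate; exact pv_ofList_nodup _ hnd1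
  have hb2 : alt_rotate (ws.map (fun p : Int × Int => (p.2, 3 - p.1)))
      = ws.map (fun p : Int × Int => (3 - p.1, 3 - p.2)) := by
    unfold alt_rotate
    rw [List.map_map, pv_comp2]
    exact pv_ofList_nodup _ hnd2
  have hb3 : alt_rotate (ws.map (fun p : Int × Int => (3 - p.1, 3 - p.2)))
      = ws.map (fun p : Int × Int => (3 - p.2, p.1)) := by
    unfold alt_rotate
    rw [List.map_map, pv_comp3]
    exact pv_ofList_nodup _ hnd3
  rw [hrw1, hrw2, hrw3, hs0]
  simp only [hb1, hb2, hb3]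
  rw [pv_round_eq cp ws hnd0, pv_round_eq cp _ hnd1, pv_round_eq cp _ hnd2, pv_round_eq cp _ hnd3]
  -- A reads ws itself in round 0; ws is already sorted
  have hsor : PySem.List.sorted2 ws Prod.fst Prod.snd = ws :=
    pv_sorted2_eq ws ws (List.Perm.refl ws) hpw
  rw [hsor]
  simp only [pv_strfold]
  simp only [List.nil_append, pv_join_append]
  simp [String.empty_append, String.append_assoc]
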